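-- pv_equiv track=rewrite | github.com/HARISHBAVNE/PYTHON | PYTHON 1/Digits8.py | Count
-- ===== SOURCE A (Python) =====
-- def Count(No):
--     count = 0
--     if (No < 0):
--         No = -(No)
--     while(No > 0):
--         if ((No%10) > 3) and ((No%10) < 7):
--             count += 1
--         No = No//10
--     return count
-- ===== SOURCE B (Python) =====
-- def Count(No):
--     return sum(1 for c in str(abs(No)) if c in '456')
-- ===== Notes on version B (the rewrite author's own statement) =====
-- stated objective: idiomatic
-- what changed: Replaces the arithmetic digit-peeling while-loop (modulus and integer division) by a single comprehension over the decimal string of abs(No), counting characters in '456'.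
import Mathlib
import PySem

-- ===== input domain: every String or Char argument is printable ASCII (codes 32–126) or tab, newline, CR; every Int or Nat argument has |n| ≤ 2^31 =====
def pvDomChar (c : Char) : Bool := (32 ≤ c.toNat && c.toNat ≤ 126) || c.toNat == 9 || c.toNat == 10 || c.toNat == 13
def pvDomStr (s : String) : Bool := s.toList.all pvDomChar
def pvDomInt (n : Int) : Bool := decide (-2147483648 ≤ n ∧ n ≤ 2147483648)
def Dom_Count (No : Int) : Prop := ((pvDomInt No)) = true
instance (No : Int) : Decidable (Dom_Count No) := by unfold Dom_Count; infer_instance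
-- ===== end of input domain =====

-- B counts the characters of str(abs(No)) that lie in '456' instead of peeling digits arithmetically (idiomatic; same cost).

-- ===== PORT A =====
def countLoopA (No : Int) (count : Int) : Int :=
  if _h : No > 0 then
    countLoopA (PySem.Int.floordiv No 10)
      (if PySem.Int.mod No 10 > 3 ∧ PySem.Int.mod No 10 < 7 then count + 1 else count)
  else count
termination_by No.toNat
decreasing_by
  have : PySem.Int.floordiv No 10 = No / 10 :=
    PySem.Int.floordiv_eq_ediv_of_pos (by norm_num)
  rw [this]; omega

def Count (No : Int) : Int :=
  countLoopA (if No < 0 then -No else No) 0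

-- ===== PORT B =====
def Count_alt (No : Int) : Int :=
  (((PySem.Int.toStr (Int.natAbs No : Int)).toList.filter
      (fun c => (['4', '5', '6'] : List Char).contains c)).length : Int)

-- ===== PRECONDITION & SPEC =====
def Spec_Count (No : Int) (out : Int) : Prop := out = Count_alt No
instance (No : Int) (out : Int) : Decidable (Spec_Count No out) := by unfold Spec_Count; infer_instance

-- ===== CLAIM (what is proved, stated in full; the proofs are below) =====
def Claim_equal_Count : Prop := ∀ (No : Int), Dom_Count No → Spec_Count No (Count No)

-- ===== LEMMAS AND PROOFS =====

def pvP (c : Char) : Bool := (['4', '5', '6'] : List Char).contains c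

-- decimal digits of n, most significant first (the list Nat.toDigits produces)
def pvDrep (n : Nat) : List Char :=
  if h : n / 10 = 0 then [Nat.digitChar (n % 10)]
  else pvDrep (n / 10) ++ [Nat.digitChar (n % 10)]
termination_by n
decreasing_by omega

lemma pvDrep_eq_pos (n : Nat) (h : n / 10 ≠ 0) :
    pvDrep n = pvDrep (n / 10) ++ [Nat.digitChar (n % 10)] := by
  rw [pvDrep]; simp [h]

lemma pvDrep_eq_small (n : Nat) (h : n / 10 = 0) :
    pvDrep n = [Nat.digitChar (n % 10)] := by
  rw [pvDrep]; simp [h]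

lemma toDigitsCore_eq (f : Nat) : ∀ (n : Nat) (acc : List Char), n < f →
    Nat.toDigitsCore 10 f n acc = pvDrep n ++ acc := by
  induction f with
  | zero => intro n acc h; omega
  | succ f ih =>
    intro n acc h
    rw [Nat.toDigitsCore]
    by_cases h0 : n / 10 = 0
    · simp [h0, pvDrep_eq_small n h0]
    · simp only [h0, if_false]
      rw [ih (n / 10) _ (by omega), pvDrep_eq_pos n h0]
      simp

lemma toDigits_eq (n : Nat) : Nat.toDigits 10 n = pvDrep n := by
  rw [Nat.toDigits, toDigitsCore_eq (n + 1) n [] (by omega)]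
  simp

lemma digit_cond (m : Nat) (hm : m < 10) :
    ((3 < (m : Int) ∧ (m : Int) < 7) ↔ pvP (Nat.digitChar m) = true) := by
  interval_cases m <;> simp [pvP] <;> decide

lemma countLoopA_eq (n : Nat) : ∀ (c : Int),
    countLoopA (n : Int) c
      = c + (((if n = 0 then ([] : List Char) else pvDrep n).filter pvP).length : Int) := by
  induction n using Nat.strong_induction_on with
  | _ n ih =>
    intro c
    rw [countLoopA]
    by_cases h0 : n = 0
    · simp [h0]
    · have hpos : (0 : Int) < (n : Int) := by exact_mod_cast Nat.pos_of_ne_zero h0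
      simp only [hpos, gt_iff_lt, dif_pos]
      have hfd : PySem.Int.floordiv (n : Int) 10 = ((n / 10 : Nat) : Int) := by
        exact_mod_cast PySem.Int.floordiv_natCast n 10
      have hmd : PySem.Int.mod (n : Int) 10 = ((n % 10 : Nat) : Int) := by
        exact_mod_cast PySem.Int.mod_natCast n 10
      rw [hfd, hmd, ih (n / 10) (by omega)]
      have hcond := digit_cond (n % 10) (Nat.mod_lt n (by omega))
      by_cases hd : n / 10 = 0
      · rw [pvDrep_eq_small n hd]
        simp only [hd, if_neg h0]
        by_cases hp : pvP (Nat.digitChar (n % 10)) = true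
        · rw [if_pos (hcond.mpr hp)]
          simp [List.filter, hp]
        · rw [if_neg (fun hc => hp (hcond.mp hc))]
          simp [List.filter, Bool.eq_false_iff.mpr hp]
      · rw [pvDrep_eq_pos n hd]
        simp only [hd, if_neg h0, List.filter_append, List.length_append]
        by_cases hp : pvP (Nat.digitChar (n % 10)) = true
        · rw [if_pos (hcond.mpr hp)]
          simp [List.filter, hp]; omega
        · rw [if_neg (fun hc => hp (hcond.mp hc))]
          simp [List.filter, Bool.eq_false_iff.mpr hp]

lemma count_alt_eq (No : Int) :
    Count_alt No = (((pvDrep No.natAbs).filter pvP).length : Int) := by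
  unfold Count_alt
  rw [PySem.Int.toList_toStr]
  have h1 : PySem.Int.toChars (Int.natAbs No : Int) = Nat.toDigits 10 No.natAbs := by
    unfold PySem.Int.toChars
    rw [if_neg (by omega)]
    congr 1
  rw [h1, toDigits_eq]
  rfl

-- ===== VERDICT (by name: the statement is the Claim_ definition above) =====
theorem Count_spec : Claim_equal_Count := by
  intro No _
  unfold Spec_Count Count
  have habs : (if No < 0 then -No else No) = ((No.natAbs : Nat) : Int) := by
    split_ifs <;> omega
  rw [habs, countLoopA_eq No.natAbs 0, count_alt_eq]
  by_cases h0 : No.natAbs = 0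
  · rw [h0]; simp [pvDrep_eq_small 0 (by omega)]
  · simp [h0]
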